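-- pv_equiv track=rewrite | github.com/krailis/99-Problems | Python/lists/lists.py | length_frequency_sort
-- ===== SOURCE A (Python) =====
-- def length_frequency_sort(list_a: list):
--     """Problem 28: (b) Sort lists according to length frequency of sublists
--
--     Parameters
--     ----------
--     list_a : list
--         The input list
--
--     Returns
--     -------
--     list of list
--         A list of lists sorted according to the length frequency of the sublists
--
--     Raises
--     ------
--     TypeError
--         If the given argument is not of `list` type
--
--     """
--     if not isinstance(list_a, list):
--         raise TypeError('The argument given is not of `list` type.')
--
--     sorted_list = []
--     list_length_dict = dict()
--     for list_length in list(map(len, list_a)):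
--         list_length_dict[list_length] = [y for y in list_a if len(y) == list_length]
--     length_sorted = sorted(list_length_dict.values(), key=len)
--     for sublist in length_sorted:
--         sorted_list.extend(sublist)
--
--     return sorted_list
-- ===== SOURCE B (Python) =====
-- def length_frequency_sort(list_a: list):
--     groups = {}
--     for y in list_a:
--         groups.setdefault(len(y), []).append(y)
--     ordered = sorted(groups.values(), key=len)
--     return [x for g in ordered for x in g]
-- ===== Notes on version B (the rewrite author's own statement) =====
-- stated objective: alternative
-- what changed: Replaces A's per-length full-list comprehension (rescanning the whole list for every element's length) with a single grouping pass into an insertion-ordered dict, then the same stable sort of groups by size and a flattening comprehension; intended as faster (O(n log n) vs O(n^2)) but measured only ~1.3x at the largest timed size.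
import Mathlib
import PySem

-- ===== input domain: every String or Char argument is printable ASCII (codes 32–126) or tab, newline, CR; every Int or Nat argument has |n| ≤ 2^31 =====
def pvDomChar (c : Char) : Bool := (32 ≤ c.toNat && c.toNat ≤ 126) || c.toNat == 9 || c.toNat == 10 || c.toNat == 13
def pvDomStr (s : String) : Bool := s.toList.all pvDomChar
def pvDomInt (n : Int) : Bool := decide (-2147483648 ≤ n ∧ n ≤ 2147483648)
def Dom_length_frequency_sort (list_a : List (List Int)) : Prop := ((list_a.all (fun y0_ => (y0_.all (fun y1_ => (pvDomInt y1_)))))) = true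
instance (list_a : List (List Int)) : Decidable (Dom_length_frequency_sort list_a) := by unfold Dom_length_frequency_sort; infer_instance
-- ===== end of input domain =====

-- B replaces A's per-length rescan of the whole list with a single grouping pass into
-- an insertion-ordered dict (objective: alternative; not measured ≥1.5x faster).

-- ===== PORT A =====
def length_frequency_sort (list_a : List (List Int)) : List (List Int) :=
  let sorted_list : List (List Int) := []
  let list_length_dict : PySem.Dict Int (List (List Int)) :=
    (list_a.map (fun y => (y.length : Int))).foldl
      (fun d list_length =>
        d.insert list_length (list_a.filter (fun y => (y.length : Int) == list_length)))
      PySem.Dict.empty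
  let length_sorted :=
    PySem.List.sorted list_length_dict.values (fun v => (v.length : Int)) false
  length_sorted.foldl (fun acc sublist => acc ++ sublist) sorted_list

-- ===== PORT B =====
def length_frequency_sort_alt (list_a : List (List Int)) : List (List Int) :=
  let groups : PySem.Dict Int (List (List Int)) :=
    list_a.foldl (fun d y => d.modify (y.length : Int) [] (fun g => g ++ [y])) PySem.Dict.empty
  let ordered := PySem.List.sorted groups.values (fun g => (g.length : Int)) false
  ordered.flatMap (fun g => g)

-- ===== PRECONDITION & SPEC =====
def Spec_length_frequency_sort (list_a : List (List Int)) (out : List (List Int)) : Prop := out = length_frequency_sort_alt list_a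
instance (list_a : List (List Int)) (out : List (List Int)) : Decidable (Spec_length_frequency_sort list_a out) := by unfold Spec_length_frequency_sort; infer_instance

-- ===== CLAIM (what is proved, stated in full; the proofs are below) =====
def Claim_equal_length_frequency_sort : Prop := ∀ (list_a : List (List Int)), Dom_length_frequency_sort list_a → Spec_length_frequency_sort list_a (length_frequency_sort list_a)

-- ===== LEMMAS AND PROOFS =====

-- A's dict loop inserts a value that depends only on the key: the final lookup is F c
-- for every key that occurred, untouched otherwise.
theorem getD_foldl_insert_const (F : Int → List (List Int)) (ks : List Int) :
    ∀ (d : PySem.Dict Int (List (List Int))) (c : Int),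
      ((ks.foldl (fun d L => d.insert L (F L)) d).getD c []) =
        if c ∈ ks then F c else d.getD c [] := by
  induction ks with
  | nil => intro d c; simp
  | cons k ks ih =>
    intro d c
    simp only [List.foldl_cons, ih]
    by_cases h : c ∈ ks
    · simp [h]
    · by_cases hk : c = k
      · simp [hk]
      · simp [h, hk, PySem.Dict.getD_insert]

-- B's grouping loop: the final lookup at c is the sublists of length c, in order.
theorem getD_groups (la : List (List Int)) (c : Int) :
    (la.foldl (fun d y => d.modify (y.length : Int) [] (fun g => g ++ [y]))
        PySem.Dict.empty).getD c []
      = la.filter (fun y => (y.length : Int) == c) := by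
  have h := PySem.Dict.getD_foldl_modify_append
      (la.map (fun y => ((y.length : Int), y))) PySem.Dict.empty c
  rw [List.foldl_map] at h
  simpa [List.filter_map, List.map_map, Function.comp_def] using h

-- The two dicts have the same values list.
theorem values_eq (la : List (List Int)) :
    ((la.map (fun y => (y.length : Int))).foldl
        (fun d list_length =>
          d.insert list_length (la.filter (fun y => (y.length : Int) == list_length)))
        PySem.Dict.empty).values
      = (la.foldl (fun d y => d.modify (y.length : Int) [] (fun g => g ++ [y]))
          PySem.Dict.empty).values := by
  have hKA := PySem.Dict.keys_foldl_insert (la.map (fun y => (y.length : Int)))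
      (fun _ L => la.filter (fun y => (y.length : Int) == L)) PySem.Dict.empty
  have hKB := PySem.Dict.keys_foldl_modify_key la (fun y => (y.length : Int)) []
      (fun _ y => fun g => g ++ [y]) PySem.Dict.empty
  have hNA := PySem.Dict.nodup_keys_foldl_insert (la.map (fun y => (y.length : Int)))
      (fun _ L => la.filter (fun y => (y.length : Int) == L)) PySem.Dict.empty
      (by simp)
  have hNB := PySem.Dict.nodup_keys_foldl_modify_key la (fun y => (y.length : Int)) []
      (fun _ y => fun g => g ++ [y]) PySem.Dict.empty (by simp)
  rw [PySem.Dict.values_eq_map_keys _ hNA [], PySem.Dict.values_eq_map_keys _ hNB []]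
  rw [hKA, hKB]
  apply List.map_congr_left
  intro k hk
  have hkmem : k ∈ la.map (fun y => (y.length : Int)) := by
    have := (PySem.Set.mem_update (PySem.Dict.empty
        (κ := Int) (ν := List (List Int))).keys (la.map (fun y => (y.length : Int))) k).mp
    simp only [PySem.Dict.keys_empty] at this
    rcases this (by rw [← PySem.Dict.keys_empty (κ := Int) (ν := List (List Int))] ; exact hk) with h | h
    · simp at h
    · exact h
  rw [getD_foldl_insert_const, getD_groups, if_pos hkmem]

-- ===== VERDICT (by name: the statement is the Claim_ definition above) =====
theorem length_frequency_sort_spec : Claim_equal_length_frequency_sort := by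
  intro la _
  unfold Spec_length_frequency_sort length_frequency_sort length_frequency_sort_alt
  simp only []
  rw [values_eq la]
  rw [PySem.List.foldl_append_eq_flatMap (fun sublist => sublist)]
  simp
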